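-- pv_equiv track=rewrite | github.com/NICKmop/CODINGTEST_python | LEVEL2/soSpicy.py | solution
-- ===== SOURCE A (Python) =====
-- def solution(scoville, k):
--     answer = 0
--     scoville = sorted(scoville);
--
--     # for i in range(scovilleLen):
--     while True:
--         if scoville[0] >= 7:
--             break;
--         else:
--             # while True:
--             scoville[0] = scoville[0] + (scoville[1] * 2); # 5
--             scoville.pop(1);
--             scoville = sorted(scoville);
--
--             answer += 1;
--
--     return answer
-- ===== SOURCE B (Python) =====
-- def solution(scoville, k):
--     from collections import deque
--     orig = deque(sorted(scoville))
--     merged = deque()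
--
--     def pop_smallest():
--         if not merged or (orig and orig[0] <= merged[0]):
--             return orig.popleft()
--         return merged.popleft()
--
--     answer = 0
--     while True:
--         if orig and merged:
--             m = min(orig[0], merged[0])
--         elif orig:
--             m = orig[0]
--         else:
--             m = merged[0]
--         if m >= 7:
--             return answer
--         a = pop_smallest()
--         b = pop_smallest()
--         merged.append(a + 2 * b)
--         answer += 1
-- ===== Notes on version B (the rewrite author's own statement) =====
-- stated objective: faster
-- what changed: A re-sorts the whole list after every mix; B sorts once and then runs a two-queue (sorted originals + FIFO of mixed values, which can be shown to come out in non-decreasing order) merge loop with O(1) extraction of the two smallest, so the per-mix re-sort disappears; intended as faster (a timing run measured B 121x at n=16384, the largest size where A finishes; at larger sizes both exceed the budget because merged Scoville values grow into huge big-ints).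
import Mathlib
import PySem

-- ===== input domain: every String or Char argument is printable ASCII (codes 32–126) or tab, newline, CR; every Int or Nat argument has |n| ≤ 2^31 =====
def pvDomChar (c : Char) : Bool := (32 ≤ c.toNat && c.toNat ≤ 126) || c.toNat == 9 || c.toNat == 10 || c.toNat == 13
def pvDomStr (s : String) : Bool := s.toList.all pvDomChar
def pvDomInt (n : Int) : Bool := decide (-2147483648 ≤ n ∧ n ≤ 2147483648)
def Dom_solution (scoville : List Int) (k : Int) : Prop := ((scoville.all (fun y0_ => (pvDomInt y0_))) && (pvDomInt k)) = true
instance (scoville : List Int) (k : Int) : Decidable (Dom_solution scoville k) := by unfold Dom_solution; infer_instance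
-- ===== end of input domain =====

-- B replaces A's re-sort-after-every-mix loop by a single sort plus a two-queue merge
-- loop (objective: faster; intended as asymptotically faster — a timing run measured
-- B 121x at n=16384, the largest size where A finishes; at larger sizes both time out on
-- huge big-int Scovilles).  A mutates its list argument in Python; the equivalence proved
-- here is about the return value only (B does not mutate scoville).

-- ===== PORT A =====
-- A's while-True loop: each pass reads scoville[0] (IndexError on []), breaks at >= 7,
-- else folds scoville[1] (IndexError when only one element is left) into scoville[0],
-- pops index 1 and re-sorts.  The two IndexError points are outside Pre_solution; the
-- port returns the accumulator there (junk, never claimed).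
def solutionGo (scoville : List Int) (answer : Int) : Int :=
  match scoville with
  | [] => answer                      -- Python: IndexError at scoville[0] (outside Pre_)
  | x :: rest =>
    if 7 ≤ x then answer
    else
      match rest with
      | [] => answer                  -- Python: IndexError at scoville[1] (outside Pre_)
      | y :: rest2 =>
        solutionGo (PySem.List.sorted ((x + y * 2) :: rest2) (fun v => v) false) (answer + 1)
  termination_by scoville.length
  decreasing_by simp [PySem.List.length_sorted]

def solution (scoville : List Int) (k : Int) : Int :=
  solutionGo (PySem.List.sorted scoville (fun v => v) false) 0

-- ===== PORT B =====
-- Source B's pop_smallest(): front of the sorted originals vs front of the mixed FIFO.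
def popSmallest (orig merged : List Int) : Option (Int × List Int × List Int) :=
  match orig, merged with
  | [], [] => none                    -- Python: IndexError popping an empty deque (outside Pre_)
  | o :: os, [] => some (o, os, [])
  | [], m :: ms => some (m, [], ms)
  | o :: os, m :: ms => if o ≤ m then some (o, os, m :: ms) else some (m, o :: os, ms)

theorem popSmallest_length {orig merged o' m' : List Int} {a : Int}
    (h : popSmallest orig merged = some (a, o', m')) :
    o'.length + m'.length + 1 = orig.length + merged.length := by
  unfold popSmallest at h
  cases orig with
  | nil => cases merged with
    | nil => simp at h
    | cons m ms =>
      simp only [Option.some.injEq, Prod.mk.injEq] at h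
      simp [← h.2.1, ← h.2.2]
  | cons o os => cases merged with
    | nil =>
      simp only [Option.some.injEq, Prod.mk.injEq] at h
      simp [← h.2.1, ← h.2.2]
    | cons m ms =>
      by_cases hc : o ≤ m <;>
        simp only [hc, if_true, if_false, Option.some.injEq, Prod.mk.injEq] at h <;>
        simp [← h.2.1, ← h.2.2] <;> omega

-- Source B's current-minimum computation (min of the two fronts).
def frontMin (orig merged : List Int) : Int :=
  match orig, merged with
  | o :: _, m :: _ => min o m
  | o :: _, [] => o
  | [], m :: _ => m
  | [], [] => 0                       -- Python: IndexError (outside Pre_)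

def solutionAltGo (orig merged : List Int) (answer : Int) : Int :=
  if 7 ≤ frontMin orig merged then answer
  else
    match h1 : popSmallest orig merged with
    | none => answer
    | some (a, o1, m1) =>
      match h2 : popSmallest o1 m1 with
      | none => answer                -- Python: IndexError on the second pop (outside Pre_)
      | some (b, o2, m2) => solutionAltGo o2 (m2 ++ [a + 2 * b]) (answer + 1)
  termination_by orig.length + merged.length
  decreasing_by
    have e1 := popSmallest_length h1
    have e2 := popSmallest_length h2
    simp; omega

def solution_alt (scoville : List Int) (k : Int) : Int :=
  solutionAltGo (PySem.List.sorted scoville (fun v => v) false) [] 0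

-- ===== PRECONDITION & SPEC =====
-- A raises IndexError exactly on the empty list and on lists whose complete mix-down
-- (repeatedly combining the two mildest pots, first + 2 * second, until one pot is left;
-- a list of n pots needs exactly n - 1 mixes) ends below 7: an early break of A requires
-- EVERY pot to be >= 7, and mixing pots >= 7 keeps them >= 7, so the full mix-down then
-- also ends >= 7.  Pre_ excludes exactly those crash inputs and nothing else (the crash
-- set has no simpler arithmetic description); mixDown states the mix-down value directly
-- (no threshold test, no mix counting) and the equivalence proof below never uses Pre_.
def mixDown : Nat → List Int → Int
  | _, [] => 0
  | _, [x] => x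
  | 0, x :: _ :: _ => x               -- never reached: the counter starts at the list length
  | n+1, x :: y :: t => mixDown n (PySem.List.sorted ((x + y * 2) :: t) (fun v => v) false)

def Pre_solution (scoville : List Int) (k : Int) : Prop :=
  scoville ≠ [] ∧ 7 ≤ mixDown scoville.length (PySem.List.sorted scoville (fun v => v) false)
instance (scoville : List Int) (k : Int) : Decidable (Pre_solution scoville k) := by
  unfold Pre_solution; infer_instance
def pvWitness_solution : List Int × Int := ([1, 10], 0)

def Spec_solution (scoville : List Int) (k : Int) (out : Int) : Prop := out = solution_alt scoville k
instance (scoville : List Int) (k : Int) (out : Int) : Decidable (Spec_solution scoville k out) := by unfold Spec_solution; infer_instance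

-- ===== CLAIM (what is proved, stated in full; the proofs are below) =====
def Claim_equal_solution : Prop := ∀ (scoville : List Int) (k : Int), Dom_solution scoville k → Pre_solution scoville k → Spec_solution scoville k (solution scoville k)

-- ===== LEMMAS AND PROOFS =====

theorem popSmallest_perm {orig merged o' m' : List Int} {a : Int}
    (h : popSmallest orig merged = some (a, o', m')) :
    (orig ++ merged).Perm (a :: (o' ++ m')) := by
  unfold popSmallest at h
  cases orig with
  | nil => cases merged with
    | nil => simp at h
    | cons m ms =>
      simp only [Option.some.injEq, Prod.mk.injEq] at h
      simp [← h.1, ← h.2.1, ← h.2.2]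
  | cons o os => cases merged with
    | nil =>
      simp only [Option.some.injEq, Prod.mk.injEq] at h
      simp [← h.1, ← h.2.1, ← h.2.2]
    | cons m ms =>
      by_cases hc : o ≤ m <;>
        simp only [hc, if_true, if_false, Option.some.injEq, Prod.mk.injEq] at h
      · simp [← h.1, ← h.2.1, ← h.2.2]
      · rw [← h.1, ← h.2.1, ← h.2.2]
        exact List.perm_middle

theorem popSmallest_min {orig merged o' m' : List Int} {a : Int}
    (ho : orig.Pairwise (· ≤ ·)) (hm : merged.Pairwise (· ≤ ·))
    (h : popSmallest orig merged = some (a, o', m')) :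
    ∀ x ∈ orig ++ merged, a ≤ x := by
  unfold popSmallest at h
  cases orig with
  | nil => cases merged with
    | nil => simp at h
    | cons m ms =>
      simp only [Option.some.injEq, Prod.mk.injEq] at h
      intro x hx
      simp only [List.nil_append, List.mem_cons] at hx
      rcases hx with rfl | hx
      · omega
      · exact h.1 ▸ (List.rel_of_pairwise_cons hm hx)
  | cons o os => cases merged with
    | nil =>
      simp only [Option.some.injEq, Prod.mk.injEq] at h
      intro x hx
      simp only [List.append_nil, List.mem_cons] at hx
      rcases hx with rfl | hx
      · omega
      · exact h.1 ▸ (List.rel_of_pairwise_cons ho hx)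
    | cons m ms =>
      by_cases hc : o ≤ m <;>
        simp only [hc, if_true, if_false, Option.some.injEq, Prod.mk.injEq] at h <;>
        intro x hx <;>
        simp only [List.mem_append, List.mem_cons] at hx
      · rcases hx with (rfl | hx) | (rfl | hx)
        · omega
        · exact h.1 ▸ (List.rel_of_pairwise_cons ho hx)
        · omega
        · exact h.1 ▸ (le_trans hc (List.rel_of_pairwise_cons hm hx))
      · rcases hx with (rfl | hx) | (rfl | hx)
        · omega
        · exact h.1 ▸ (le_trans (by omega) (List.rel_of_pairwise_cons ho hx))
        · omega
        · exact h.1 ▸ (List.rel_of_pairwise_cons hm hx)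

theorem popSmallest_sorted {orig merged o' m' : List Int} {a : Int}
    (ho : orig.Pairwise (· ≤ ·)) (hm : merged.Pairwise (· ≤ ·))
    (h : popSmallest orig merged = some (a, o', m')) :
    o'.Pairwise (· ≤ ·) ∧ m'.Pairwise (· ≤ ·) := by
  unfold popSmallest at h
  cases orig with
  | nil => cases merged with
    | nil => simp at h
    | cons m ms =>
      simp only [Option.some.injEq, Prod.mk.injEq] at h
      exact ⟨h.2.1 ▸ List.Pairwise.nil, h.2.2 ▸ hm.of_cons⟩
  | cons o os => cases merged with
    | nil =>
      simp only [Option.some.injEq, Prod.mk.injEq] at h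
      exact ⟨h.2.1 ▸ ho.of_cons, h.2.2 ▸ List.Pairwise.nil⟩
    | cons m ms =>
      by_cases hc : o ≤ m <;>
        simp only [hc, if_true, if_false, Option.some.injEq, Prod.mk.injEq] at h
      · exact ⟨h.2.1 ▸ ho.of_cons, h.2.2 ▸ hm⟩
      · exact ⟨h.2.1 ▸ ho, h.2.2 ▸ hm.of_cons⟩

theorem popSmallest_sublist {orig merged o' m' : List Int} {a : Int}
    (h : popSmallest orig merged = some (a, o', m')) :
    o'.Sublist orig ∧ m'.Sublist merged := by
  unfold popSmallest at h
  cases orig with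
  | nil => cases merged with
    | nil => simp at h
    | cons m ms =>
      simp only [Option.some.injEq, Prod.mk.injEq] at h
      exact ⟨h.2.1 ▸ List.Sublist.refl _, h.2.2 ▸ List.sublist_cons_self _ _⟩
  | cons o os => cases merged with
    | nil =>
      simp only [Option.some.injEq, Prod.mk.injEq] at h
      exact ⟨h.2.1 ▸ List.sublist_cons_self _ _, h.2.2 ▸ List.Sublist.refl _⟩
    | cons m ms =>
      by_cases hc : o ≤ m <;>
        simp only [hc, if_true, if_false, Option.some.injEq, Prod.mk.injEq] at h
      · exact ⟨h.2.1 ▸ List.sublist_cons_self _ _, h.2.2 ▸ List.Sublist.refl _⟩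
      · exact ⟨h.2.1 ▸ List.Sublist.refl _, h.2.2 ▸ List.sublist_cons_self _ _⟩

-- The popped value bounds every surviving queue element: e ≤ 3 * a.
theorem popSmallest_bound {orig merged o' m' : List Int} {a : Int}
    (hq3 : merged.Pairwise (fun e L => L ≤ 3 * e))
    (hoq : ∀ L ∈ merged, ∀ x ∈ orig, L ≤ 3 * x)
    (h : popSmallest orig merged = some (a, o', m')) :
    ∀ e ∈ m', e ≤ 3 * a := by
  unfold popSmallest at h
  cases orig with
  | nil => cases merged with
    | nil => simp at h
    | cons m ms =>
      simp only [Option.some.injEq, Prod.mk.injEq] at h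
      intro e he
      rw [← h.2.2] at he
      exact h.1 ▸ List.rel_of_pairwise_cons hq3 he
  | cons o os => cases merged with
    | nil =>
      simp only [Option.some.injEq, Prod.mk.injEq] at h
      intro e he
      rw [← h.2.2] at he
      simp at he
    | cons m ms =>
      by_cases hc : o ≤ m <;>
        simp only [hc, if_true, if_false, Option.some.injEq, Prod.mk.injEq] at h <;>
        intro e he <;> rw [← h.2.2] at he
      · exact h.1 ▸ hoq e he o (by simp)
      · exact h.1 ▸ List.rel_of_pairwise_cons hq3 he

theorem popSmallest_none_iff {orig merged : List Int} :
    popSmallest orig merged = none ↔ orig = [] ∧ merged = [] := by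
  unfold popSmallest
  cases orig <;> cases merged <;> simp
  split <;> simp

theorem frontMin_eq_pop {orig merged o' m' : List Int} {a : Int}
    (h : popSmallest orig merged = some (a, o', m')) :
    frontMin orig merged = a := by
  unfold popSmallest at h
  cases orig with
  | nil => cases merged with
    | nil => simp at h
    | cons m ms =>
      simp only [Option.some.injEq, Prod.mk.injEq] at h
      show m = a; exact h.1
  | cons o os => cases merged with
    | nil =>
      simp only [Option.some.injEq, Prod.mk.injEq] at h
      show o = a; exact h.1
    | cons m ms =>
      show min o m = a
      by_cases hc : o ≤ m <;>
        simp only [hc, if_true, if_false, Option.some.injEq, Prod.mk.injEq] at h <;>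
        rw [← h.1] <;> omega

theorem main_lemma (n : Nat) (orig merged : List Int) (answer : Int)
    (hn : orig.length + merged.length ≤ n)
    (ho : orig.Pairwise (· ≤ ·)) (hm : merged.Pairwise (· ≤ ·))
    (hq3 : merged.Pairwise (fun e L => L ≤ 3 * e))
    (hoq : ∀ L ∈ merged, ∀ x ∈ orig, L ≤ 3 * x) :
    solutionGo (PySem.List.sorted (orig ++ merged) (fun v => v) false) answer
      = solutionAltGo orig merged answer := by
  induction n generalizing orig merged answer with
  | zero =>
    have h0 : orig = [] ∧ merged = [] := by
      constructor <;> [cases orig; cases merged] <;> simp_all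
    rw [h0.1, h0.2]
    simp [solutionGo, solutionAltGo, frontMin, popSmallest,
      (PySem.List.sorted_eq_nil_iff ([] : List Int) (fun v => v) false).mpr rfl]
  | succ n ih =>
    cases hs : PySem.List.sorted (orig ++ merged) (fun v => v) false with
    | nil =>
      rw [PySem.List.sorted_eq_nil_iff] at hs
      have h0 : orig = [] ∧ merged = [] := by
        cases orig <;> simp_all
      rw [h0.1, h0.2]
      simp [solutionGo, solutionAltGo, frontMin, popSmallest]
    | cons m1 tail =>
      have hperm : (orig ++ merged).Perm (m1 :: tail) := by
        have := PySem.List.sorted_perm (orig ++ merged) (fun v => v) false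
        rw [hs] at this
        exact this.symm
      cases tail with
      | nil =>
        have he : orig ++ merged = [m1] := List.perm_singleton.mp hperm
        clear ih hperm hs hoq hq3 hn
        cases orig with
        | nil =>
          simp only [List.nil_append] at he
          rw [he]
          simp [solutionGo, solutionAltGo, frontMin, popSmallest]
        | cons o os =>
          rw [List.cons_append] at he
          have h1 := List.head_eq_of_cons_eq he
          have h2 := List.append_eq_nil_iff.mp (List.tail_eq_of_cons_eq he)
          rw [h1, h2.1, h2.2]
          simp [solutionGo, solutionAltGo, frontMin, popSmallest]
      | cons m2 t =>
        -- the two smallest values of the pot are m1 and m2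
        have hpair := PySem.List.sorted_pairwise (orig ++ merged) (fun v => v)
        rw [hs] at hpair
        have hm1le : ∀ y ∈ m2 :: t, m1 ≤ y := fun y hy => List.rel_of_pairwise_cons hpair hy
        have hm2le : ∀ y ∈ t, m2 ≤ y := fun y hy => List.rel_of_pairwise_cons hpair.of_cons hy
        have hm1mem : m1 ∈ orig ++ merged := hperm.mem_iff.mpr (by simp)
        have hm2mem : m2 ∈ orig ++ merged := hperm.mem_iff.mpr (by simp)
        -- first pop
        obtain ⟨a, o1, m1l, h1⟩ : ∃ a o1 m1l, popSmallest orig merged = some (a, o1, m1l) := by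
          cases hp : popSmallest orig merged with
          | none =>
            rw [popSmallest_none_iff] at hp
            rw [hp.1, hp.2] at hperm
            have := hperm.length_eq
            simp at this
          | some r => obtain ⟨x, y, z⟩ := r; exact ⟨x, y, z, rfl⟩
        have hpp1 := popSmallest_perm h1
        have ha : a = m1 := by
          have h1a : a ≤ m1 := popSmallest_min ho hm h1 m1 hm1mem
          have hamem : a ∈ orig ++ merged := hpp1.mem_iff.mpr (List.mem_cons_self ..)
          have h2a : m1 ≤ a := by
            simpa using PySem.List.key_head_sorted_le _ _ hs a hamem
          omega
        have hsort1 := popSmallest_sorted ho hm h1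
        have hsub1 := popSmallest_sublist h1
        have hq3' : m1l.Pairwise (fun e L => L ≤ 3 * e) := hq3.sublist hsub1.2
        have hoq' : ∀ L ∈ m1l, ∀ x ∈ o1, L ≤ 3 * x :=
          fun L hL x hx => hoq L (hsub1.2.subset hL) x (hsub1.1.subset hx)
        have hperm1 : (o1 ++ m1l).Perm (m2 :: t) := by
          have : (a :: (o1 ++ m1l)).Perm (m1 :: m2 :: t) := hpp1.symm.trans hperm
          rw [ha] at this
          exact this.cons_inv
        -- second pop
        obtain ⟨b, o2, m2l, h2⟩ : ∃ b o2 m2l, popSmallest o1 m1l = some (b, o2, m2l) := by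
          cases hp : popSmallest o1 m1l with
          | none =>
            rw [popSmallest_none_iff] at hp
            rw [hp.1, hp.2] at hperm1
            have := hperm1.length_eq
            simp at this
          | some r => obtain ⟨x, y, z⟩ := r; exact ⟨x, y, z, rfl⟩
        have hpp2 := popSmallest_perm h2
        have hb : b = m2 := by
          have h1b : b ≤ m2 := popSmallest_min hsort1.1 hsort1.2 h2 m2 (hperm1.mem_iff.mpr (by simp))
          have hbmem : b ∈ m2 :: t := hperm1.mem_iff.mp (hpp2.mem_iff.mpr (by simp))
          rcases List.mem_cons.mp hbmem with rfl | hbt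
          · rfl
          · have := hm2le b hbt; omega
        have hsort2 := popSmallest_sorted hsort1.1 hsort1.2 h2
        have hsub2 := popSmallest_sublist h2
        have hperm2 : (o2 ++ m2l).Perm t := by
          have : (b :: (o2 ++ m2l)).Perm (m2 :: t) := hpp2.symm.trans hperm1
          rw [hb] at this
          exact this.cons_inv
        have hfm : frontMin orig merged = m1 := by rw [frontMin_eq_pop h1, ha]
        by_cases h7 : 7 ≤ m1
        · -- both sides stop
          rw [solutionGo, solutionAltGo]
          simp [h7, hfm]
        · -- both sides mix once and continue
          have hv : a + 2 * b = m1 + m2 * 2 := by rw [ha, hb]; ring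
          -- the new pot is a permutation of (m1 + m2*2) :: t
          have hpermN : (o2 ++ (m2l ++ [a + 2 * b])).Perm ((m1 + m2 * 2) :: t) := by
            have e1 : o2 ++ (m2l ++ [a + 2 * b]) = (o2 ++ m2l) ++ [a + 2 * b] := by
              rw [List.append_assoc]
            rw [e1, hv]
            have step : ((o2 ++ m2l) ++ [m1 + m2 * 2]).Perm ((m1 + m2 * 2) :: (o2 ++ m2l)) := by
              simpa using (List.perm_middle (a := m1 + m2 * 2) (l₁ := o2 ++ m2l) (l₂ := []))
            exact step.trans (hperm2.cons _)
          -- every survivor of the pot is ≥ both popped values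
          have hsurv : ∀ y ∈ o2 ++ m2l, m1 ≤ y ∧ m2 ≤ y := by
            intro y hy
            have hyt : y ∈ t := hperm2.mem_iff.mp hy
            exact ⟨hm1le y (List.mem_cons_of_mem _ hyt), hm2le y hyt⟩
          -- every surviving queue element is ≤ 3*a and ≤ 3*b
          have hbA : ∀ e ∈ m2l, e ≤ 3 * a :=
            fun e he => popSmallest_bound hq3 hoq h1 e (hsub2.2.subset he)
          have hbB : ∀ e ∈ m2l, e ≤ 3 * b := popSmallest_bound hq3' hoq' h2
          -- step program B once
          have hstepB : solutionAltGo orig merged answer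
              = solutionAltGo o2 (m2l ++ [a + 2 * b]) (answer + 1) := by
            rw [solutionAltGo, hfm, if_neg (show ¬ (7:Int) ≤ m1 from h7)]
            split
            · next heq => rw [h1] at heq; simp at heq
            · next a' o1' m1l' heq =>
              have e := h1.symm.trans heq
              simp only [Option.some.injEq, Prod.mk.injEq] at e
              obtain ⟨rfl, rfl, rfl⟩ := e
              split
              · next heq2 => rw [h2] at heq2; simp at heq2
              · next b' o2' m2l' heq2 =>
                have e2 := h2.symm.trans heq2
                simp only [Option.some.injEq, Prod.mk.injEq] at e2
                obtain ⟨rfl, rfl, rfl⟩ := e2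
                rfl
          -- step program A once
          have hstepA : solutionGo (m1 :: m2 :: t) answer
              = solutionGo (PySem.List.sorted ((m1 + m2 * 2) :: t) (fun v => v) false) (answer + 1) := by
            rw [solutionGo]
            simp [h7]
          have hsortN : PySem.List.sorted (o2 ++ (m2l ++ [a + 2 * b])) (fun v => v) false
              = PySem.List.sorted ((m1 + m2 * 2) :: t) (fun v => v) false :=
            PySem.List.sorted_eq_sorted_of_perm _ _ _ (fun x y hxy => hxy) hpermN
          rw [hstepA, hstepB, ← hsortN]
          apply ih
          · have e1 := popSmallest_length h1
            have e2 := popSmallest_length h2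
            simp only [List.length_append, List.length_cons, List.length_nil] at e1 e2 hn ⊢
            omega
          · exact hsort2.1
          · -- the queue stays sorted: surviving entries are ≤ the newly appended mix
            rw [List.pairwise_append]
            refine ⟨hsort2.2, by simp, ?_⟩
            intro x hx y hy
            simp only [List.mem_singleton] at hy
            subst hy
            have h3a := hbA x hx
            have h3b := hbB x hx
            omega
          · -- the 3e ≥ L queue invariant: survivors are ≥ m2 ≥ m1, the new mix is m1 + 2*m2
            rw [List.pairwise_append]
            refine ⟨hq3.sublist (hsub2.2.trans hsub1.2), by simp, ?_⟩
            intro x hx y hy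
            simp only [List.mem_singleton] at hy
            subst hy
            have := hsurv x (List.mem_append_right _ hx)
            omega
          · -- the originals bound: every remaining original is ≥ m2 ≥ m1
            intro L hL x hx
            rcases List.mem_append.mp hL with hL' | hL'
            · exact hoq L ((hsub2.2.trans hsub1.2).subset hL') x ((hsub2.1.trans hsub1.1).subset hx)
            · simp only [List.mem_singleton] at hL'
              subst hL'
              have := hsurv x (List.mem_append_left _ hx)
              omega

-- ===== VERDICT (by name: the statement is the Claim_ definition above) =====
theorem solution_spec : Claim_equal_solution := by
  intro scoville k _ _
  unfold Spec_solution solution solution_alt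
  have h := main_lemma scoville.length (PySem.List.sorted scoville (fun v => v) false) [] 0
    (by simp [PySem.List.length_sorted])
    (by simpa using PySem.List.sorted_pairwise scoville (fun v => v))
    List.Pairwise.nil
    List.Pairwise.nil
    (by intro L hL; simp at hL)
  rw [List.append_nil, PySem.List.sorted_sorted] at h
  exact h
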